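-- pv_equiv track=rewrite | github.com/LocusLontrime/Python | Yandex_int/Sorted_subarrays.py | i_am_brut
-- ===== SOURCE A (Python) =====
-- def i_am_brut(arr: list[int]):
--     counter = 0
--     for j in range(len(arr)):
--         i = j
--         while i < len(arr) - 1 and arr[i] <= arr[i + 1]:
--             i += 1
--         counter += i - j + 1
--     return counter
-- ===== SOURCE B (Python) =====
-- def i_am_brut(arr: list[int]):
--     # single pass: each maximal non-decreasing run of length L contributes L*(L+1)//2
--     total = 0
--     run = 0
--     prev = None
--     for x in arr:
--         if prev is not None and prev <= x:
--             run += 1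
--         else:
--             total += run * (run + 1) // 2
--             run = 1
--         prev = x
--     total += run * (run + 1) // 2
--     return total
-- ===== Notes on version B (the rewrite author's own statement) =====
-- stated objective: faster
-- what changed: Replaced the per-start inner while scan (quadratic) by one pass that finds maximal non-decreasing runs and adds each run's closed-form triangular contribution L*(L+1)//2.
import Mathlib
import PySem

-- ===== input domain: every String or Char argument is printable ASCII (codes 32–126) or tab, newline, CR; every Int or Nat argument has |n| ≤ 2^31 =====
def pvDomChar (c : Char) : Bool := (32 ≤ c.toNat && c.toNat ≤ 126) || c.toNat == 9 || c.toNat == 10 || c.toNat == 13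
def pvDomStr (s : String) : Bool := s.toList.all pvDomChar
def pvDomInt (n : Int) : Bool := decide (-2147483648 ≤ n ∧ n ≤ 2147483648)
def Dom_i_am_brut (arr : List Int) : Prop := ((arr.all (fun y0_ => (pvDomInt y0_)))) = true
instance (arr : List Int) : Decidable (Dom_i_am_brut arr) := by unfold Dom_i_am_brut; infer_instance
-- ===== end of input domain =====

-- B replaces A's per-start inner while scan by one pass over maximal non-decreasing runs
-- with a closed-form triangular contribution per run (objective: faster, O(n) vs O(n^2)).

-- ===== PORT A =====
-- inner 'while i < len(arr) - 1 and arr[i] <= arr[i+1]: i += 1'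
-- (indices are always in [0, len), so getD is exact here)
def brutWhile (arr : List Int) (i : Nat) : Nat :=
  if _h : i < arr.length - 1 ∧ arr.getD i 0 ≤ arr.getD (i + 1) 0 then
    brutWhile arr (i + 1)
  else i
termination_by arr.length - i
decreasing_by omega

def i_am_brut (arr : List Int) : Int :=
  (List.range arr.length).foldl
    (fun counter j => counter + ((brutWhile arr j : Int) - (j : Int) + 1)) 0

-- ===== PORT B =====
-- fold state = (total, run, prev); 'run*(run+1)//2' is Python floor division
def altStep (s : Int × Int × Option Int) (x : Int) : Int × Int × Option Int :=
  match s with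
  | (total, run, prev) =>
    match prev with
    | some p =>
      if p ≤ x then (total, run + 1, some x)
      else (total + PySem.Int.floordiv (run * (run + 1)) 2, 1, some x)
    | none => (total + PySem.Int.floordiv (run * (run + 1)) 2, 1, some x)

def i_am_brut_alt (arr : List Int) : Int :=
  let st := arr.foldl altStep (0, 0, none)
  st.1 + PySem.Int.floordiv (st.2.1 * (st.2.1 + 1)) 2

-- ===== PRECONDITION & SPEC =====
def Spec_i_am_brut (arr : List Int) (out : Int) : Prop := out = i_am_brut_alt arr
instance (arr : List Int) (out : Int) : Decidable (Spec_i_am_brut arr out) := by unfold Spec_i_am_brut; infer_instance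

-- ===== CLAIM (what is proved, stated in full; the proofs are below) =====
def Claim_equal_i_am_brut : Prop := ∀ (arr : List Int), Dom_i_am_brut arr → Spec_i_am_brut arr (i_am_brut arr)

-- ===== LEMMAS AND PROOFS =====

-- length of the non-decreasing run starting at x followed by l (common reference function)
def cfun (x : Int) (l : List Int) : Int :=
  match l with
  | [] => 1
  | y :: r => if x ≤ y then cfun y r + 1 else 1

-- reference sum: Σ over all start positions of the run length from there
def refSum (l : List Int) : Int :=
  match l with
  | [] => 0
  | x :: r => cfun x r + refSum r

def tri (r : Int) : Int := PySem.Int.floordiv (r * (r + 1)) 2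

lemma tri_zero : tri 0 = 0 := by decide

lemma fdiv_two (k : Int) : PySem.Int.floordiv (2 * k) 2 = k := by
  simp [PySem.Int.floordiv]

lemma tri_succ (r : Int) : tri (r + 1) = tri r + (r + 1) := by
  obtain ⟨k, hk⟩ : Even (r * (r + 1)) := Int.even_mul_succ_self r
  have e1 : r * (r + 1) = 2 * k := by omega
  have e2 : (r + 1) * (r + 1 + 1) = 2 * (k + (r + 1)) := by ring_nf; ring_nf at hk; omega
  rw [tri, tri, e1, e2, fdiv_two, fdiv_two]

-- ===== A-side: the while loop computes run lengths =====
lemma brutWhile_eq (arr : List Int) (j : Nat) (hj : j < arr.length) :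
    (brutWhile arr j : Int) - (j : Int) + 1 = cfun (arr.getD j 0) (arr.drop (j + 1)) := by
  rw [brutWhile]
  by_cases h : j < arr.length - 1 ∧ arr.getD j 0 ≤ arr.getD (j + 1) 0
  · rw [dif_pos h]
    have hlt : j + 1 < arr.length := by omega
    have ih := brutWhile_eq arr (j + 1) hlt
    have hdrop : arr.drop (j + 1) = arr.getD (j + 1) 0 :: arr.drop (j + 1 + 1) := by
      rw [List.getD_eq_getElem arr 0 hlt]
      rw [List.drop_eq_getElem_cons hlt]
    rw [hdrop]
    simp only [cfun, if_pos h.2]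
    omega
  · rw [dif_neg h]
    rcases Nat.lt_or_ge j (arr.length - 1) with hlt | hge
    · -- comparison failed: run stops here
      have hlt2 : j + 1 < arr.length := by omega
      have hdrop : arr.drop (j + 1) = arr.getD (j + 1) 0 :: arr.drop (j + 1 + 1) := by
        rw [List.getD_eq_getElem arr 0 hlt2]
        rw [List.drop_eq_getElem_cons hlt2]
      have hnot : ¬ arr.getD j 0 ≤ arr.getD (j + 1) 0 := by tauto
      rw [hdrop]
      simp only [cfun, if_neg hnot]
      omega
    · -- at the last index: drop (j+1) = []
      have : arr.drop (j + 1) = [] := List.drop_eq_nil_of_le (by omega)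
      rw [this]
      simp only [cfun]
      omega
termination_by arr.length - j
decreasing_by omega

lemma foldl_range_add (f : Nat → Int) (n : Nat) (c : Int) :
    (List.range n).foldl (fun acc j => acc + f j) c = c + ((List.range n).map f).sum := by
  induction n generalizing c with
  | zero => simp
  | succ m ih => rw [List.range_succ]; simp [ih]; ring

lemma A_eq_refSum (arr : List Int) : i_am_brut arr = refSum arr := by
  rw [i_am_brut, foldl_range_add (fun j => (brutWhile arr j : Int) - (j : Int) + 1)]
  rw [zero_add]
  induction arr with
  | nil => simp [refSum]
  | cons x l ih =>
    rw [List.length_cons, List.range_succ_eq_map]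
    simp only [List.map_cons, List.map_map, List.sum_cons, refSum]
    have h0 : (brutWhile (x :: l) 0 : Int) - (0 : Int) + 1 = cfun x l := by
      have := brutWhile_eq (x :: l) 0 (by simp)
      simpa using this
    have hshift : ∀ j, j < l.length →
        ((brutWhile (x :: l) (j + 1) : Int) - ((j + 1 : Nat) : Int) + 1)
          = (brutWhile l j : Int) - (j : Int) + 1 := by
      intro j hj
      rw [brutWhile_eq (x :: l) (j + 1) (by simp; omega), brutWhile_eq l j hj]
      simp [List.drop_succ_cons]
    have hmap : (List.range l.length).map
          ((fun j => (brutWhile (x :: l) j : Int) - (j : Int) + 1) ∘ (· + 1))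
        = (List.range l.length).map (fun j => (brutWhile l j : Int) - (j : Int) + 1) := by
      apply List.map_congr_left
      intro j hj
      rw [List.mem_range] at hj
      exact hshift j hj
    rw [hmap, ih]
    push_cast at h0 ⊢
    omega

-- ===== B-side: the fold over runs equals the reference sum =====
def finishB (s : Int × Int × Option Int) : Int := s.1 + tri s.2.1

lemma B_fold (l : List Int) : ∀ (t r : Int) (p : Int), 0 ≤ r →
    finishB (l.foldl altStep (t, r + 1, some p))
      = t + tri r + r * cfun p l + cfun p l + refSum l := by
  induction l with
  | nil =>
    intro t r p _
    simp [finishB, cfun, refSum, tri_succ]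
    ring
  | cons x l' ih =>
    intro t r p hr
    by_cases hpx : p ≤ x
    · simp only [List.foldl_cons, altStep, if_pos hpx]
      have := ih t (r + 1) x (by omega)
      rw [show r + 1 + 1 = (r + 1) + 1 from rfl] at this
      rw [this]
      simp only [cfun, if_pos hpx, refSum]
      rw [tri_succ]
      ring
    · simp only [List.foldl_cons, altStep, if_neg hpx]
      have hih := ih (t + tri (r + 1)) 0 x le_rfl
      rw [zero_add] at hih
      have htri : PySem.Int.floordiv ((r + 1) * (r + 1 + 1)) 2 = tri (r + 1) := rfl
      rw [htri, hih]
      simp only [cfun, if_neg hpx, refSum, tri_zero, tri_succ]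
      ring

lemma B_eq_refSum (arr : List Int) : i_am_brut_alt arr = refSum arr := by
  cases arr with
  | nil => decide
  | cons x l =>
    show finishB ((x :: l).foldl altStep (0, 0, none)) = refSum (x :: l)
    have h0 : PySem.Int.floordiv ((0 : Int) * (0 + 1)) 2 = 0 := by decide
    simp only [List.foldl_cons, altStep, h0, add_zero]
    have hfold := B_fold l 0 0 x le_rfl
    simp only [tri_zero, zero_add, zero_mul, add_zero] at hfold
    simp only [refSum]
    omega

-- ===== VERDICT (by name: the statement is the Claim_ definition above) =====
theorem i_am_brut_spec : Claim_equal_i_am_brut := by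
  intro arr _
  show i_am_brut arr = i_am_brut_alt arr
  rw [A_eq_refSum, B_eq_refSum]
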